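-- pv_equiv track=rewrite | github.com/unnar19/msc-project | adgrl3-experiment/classification.py | result
-- ===== SOURCE A (Python) =====
-- def result(actual, prediction):
--     """
--     pred   act
--     WT    WT     = TP
--     ADGRL ADGRL  = TN
--     WT    ADGRL  = FP
--     ADGRL WT     = FN
--
--     counts = [TP, TN, FP, FN]
--     """
--     res = []
--     counts = [0,0,0,0]
--
--     for act, pred in zip(actual, prediction):
--         if pred == "WT" and act == "WT":
--             res.append("TP")
--             counts[0] += 1
--         elif pred == "ADGRL" and act == "ADGRL":
--             res.append("TN")
--             counts[1] += 1
--         elif pred == "WT" and act == "ADGRL":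
--             res.append("FP")
--             counts[2] += 1
--         elif pred == "ADGRL" and act == "WT":
--             res.append("FN")
--             counts[3] += 1
--
--     return res, counts
-- ===== SOURCE B (Python) =====
-- def result(actual, prediction):
--     pairs = list(zip(actual, prediction))
--     table = [("TP", ("WT", "WT")),
--              ("TN", ("ADGRL", "ADGRL")),
--              ("FP", ("ADGRL", "WT")),
--              ("FN", ("WT", "ADGRL"))]
--     counts = []
--     tagged = []
--     for lab, key in table:
--         hits = [i for i, p in enumerate(pairs) if p == key]
--         counts.append(len(hits))
--         tagged.extend((i, lab) for i in hits)
--     tagged.sort(key=lambda t: t[0])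
--     res = [lab for _, lab in tagged]
--     return res, counts
-- ===== Notes on version B (the rewrite author's own statement) =====
-- stated objective: alternative
-- what changed: Instead of one pass appending labels and bumping inline counters, B scans the zipped pairs once per category collecting the matching indices (counts = the lengths of those index lists), then interleaves the four tagged index lists back into input order by sorting on index to rebuild res.
import Mathlib
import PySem

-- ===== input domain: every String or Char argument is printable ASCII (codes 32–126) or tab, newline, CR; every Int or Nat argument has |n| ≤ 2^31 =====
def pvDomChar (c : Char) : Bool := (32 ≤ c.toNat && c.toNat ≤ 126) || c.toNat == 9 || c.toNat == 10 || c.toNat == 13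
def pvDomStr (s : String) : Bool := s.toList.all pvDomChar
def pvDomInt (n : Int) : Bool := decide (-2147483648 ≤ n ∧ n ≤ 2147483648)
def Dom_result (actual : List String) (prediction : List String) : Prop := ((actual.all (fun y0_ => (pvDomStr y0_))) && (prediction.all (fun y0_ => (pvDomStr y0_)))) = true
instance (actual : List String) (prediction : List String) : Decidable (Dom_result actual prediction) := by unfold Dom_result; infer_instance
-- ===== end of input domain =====

-- B replaces A's single pass with inline counters by per-category index scans (counts = the lengths of the
-- four index lists) and rebuilds res in input order by sorting the tagged indices (alternative decomposition).

-- ===== PORT A =====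
def resultStep (st : List String × List Int) (p : String × String) : List String × List Int :=
  let res := st.1
  let counts := st.2
  let act := p.1
  let pred := p.2
  if pred == "WT" && act == "WT" then
    (res ++ ["TP"], counts.set 0 (counts.getD 0 0 + 1))
  else if pred == "ADGRL" && act == "ADGRL" then
    (res ++ ["TN"], counts.set 1 (counts.getD 1 0 + 1))
  else if pred == "WT" && act == "ADGRL" then
    (res ++ ["FP"], counts.set 2 (counts.getD 2 0 + 1))
  else if pred == "ADGRL" && act == "WT" then
    (res ++ ["FN"], counts.set 3 (counts.getD 3 0 + 1))
  else st

def result (actual : List String) (prediction : List String) : List String × List Int :=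
  (actual.zip prediction).foldl resultStep ([], [0, 0, 0, 0])

-- ===== PORT B =====
def pvTable : List (String × (String × String)) :=
  [("TP", ("WT", "WT")), ("TN", ("ADGRL", "ADGRL")), ("FP", ("ADGRL", "WT")), ("FN", ("WT", "ADGRL"))]

def result_alt (actual : List String) (prediction : List String) : List String × List Int :=
  let pairs := actual.zip prediction
  let st := pvTable.foldl
    (fun (st : List Int × List (Int × String)) lk =>
      let hits := ((PySem.List.enumerate pairs).filter (fun ip => ip.2 == lk.2)).map (fun ip => ip.1)
      (st.1 ++ [(hits.length : Int)], st.2 ++ hits.map (fun i => (i, lk.1))))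
    ([], [])
  let tagged := PySem.List.sorted st.2 (fun t => t.1)
  (tagged.map (fun t => t.2), st.1)

-- ===== PRECONDITION & SPEC =====
def Spec_result (actual : List String) (prediction : List String) (out : List String × List Int) : Prop := out = result_alt actual prediction
instance (actual : List String) (prediction : List String) (out : List String × List Int) : Decidable (Spec_result actual prediction out) := by unfold Spec_result; infer_instance

-- ===== CLAIM (what is proved, stated in full; the proofs are below) =====
def Claim_equal_result : Prop := ∀ (actual : List String) (prediction : List String), Dom_result actual prediction → Spec_result actual prediction (result actual prediction)

-- ===== LEMMAS AND PROOFS =====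

-- the pair's label, if recognized (proof helper characterizing both ports)
def labHelper (p : String × String) : Option String :=
  if p.2 == "WT" && p.1 == "WT" then some "TP"
  else if p.2 == "ADGRL" && p.1 == "ADGRL" then some "TN"
  else if p.2 == "WT" && p.1 == "ADGRL" then some "FP"
  else if p.2 == "ADGRL" && p.1 == "WT" then some "FN"
  else none

-- A's loop, characterized: res is the in-order labels, each count the label's multiplicity
lemma loop_eq (ps : List (String × String)) (r : List String) (a b c d : Int) :
    ps.foldl resultStep (r, [a, b, c, d]) =
      (r ++ ps.filterMap labHelper,
       [a + ((ps.filterMap labHelper).count "TP" : Int),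
        b + ((ps.filterMap labHelper).count "TN" : Int),
        c + ((ps.filterMap labHelper).count "FP" : Int),
        d + ((ps.filterMap labHelper).count "FN" : Int)]) := by
  induction ps generalizing r a b c d with
  | nil => simp
  | cons p ps ih =>
    obtain ⟨act, pred⟩ := p
    by_cases h1 : pred = "WT" ∧ act = "WT"
    · obtain ⟨hp, ha⟩ := h1; subst hp; subst ha
      rw [List.foldl_cons,
        show resultStep (r, [a, b, c, d]) ("WT", "WT") = (r ++ ["TP"], [a + 1, b, c, d]) from rfl, ih]
      simp [show labHelper ("WT", "WT") = some "TP" from rfl]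
      all_goals omega
    · by_cases h2 : pred = "ADGRL" ∧ act = "ADGRL"
      · obtain ⟨hp, ha⟩ := h2; subst hp; subst ha
        rw [List.foldl_cons,
          show resultStep (r, [a, b, c, d]) ("ADGRL", "ADGRL") = (r ++ ["TN"], [a, b + 1, c, d]) from rfl, ih]
        simp [show labHelper ("ADGRL", "ADGRL") = some "TN" from rfl]
        all_goals omega
      · by_cases h3 : pred = "WT" ∧ act = "ADGRL"
        · obtain ⟨hp, ha⟩ := h3; subst hp; subst ha
          rw [List.foldl_cons,
            show resultStep (r, [a, b, c, d]) ("ADGRL", "WT") = (r ++ ["FP"], [a, b, c + 1, d]) from rfl, ih]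
          simp [show labHelper ("ADGRL", "WT") = some "FP" from rfl]
          all_goals omega
        · by_cases h4 : pred = "ADGRL" ∧ act = "WT"
          · obtain ⟨hp, ha⟩ := h4; subst hp; subst ha
            rw [List.foldl_cons,
              show resultStep (r, [a, b, c, d]) ("WT", "ADGRL") = (r ++ ["FN"], [a, b, c, d + 1]) from rfl, ih]
            simp [show labHelper ("WT", "ADGRL") = some "FN" from rfl]
            all_goals omega
          · have hn : labHelper (act, pred) = none := by
              simp only [labHelper]
              rw [if_neg (by simpa using h1), if_neg (by simpa using h2),
                  if_neg (by simpa using h3), if_neg (by simpa using h4)]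
            simp only [List.foldl_cons, List.filterMap_cons, hn, resultStep]
            split_ifs with g1 g2 g3 g4
            · exact absurd (by simpa using g1) (by rintro ⟨hp, ha⟩; exact h1 ⟨hp, ha⟩)
            · exact absurd (by simpa using g2) (by rintro ⟨hp, ha⟩; exact h2 ⟨hp, ha⟩)
            · exact absurd (by simpa using g3) (by rintro ⟨hp, ha⟩; exact h3 ⟨hp, ha⟩)
            · exact absurd (by simpa using g4) (by rintro ⟨hp, ha⟩; exact h4 ⟨hp, ha⟩)
            · exact ih r a b c d

-- the tagged labels in chronological order, starting at index n (mirrors what B's sort must produce)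
def tFrom : List (String × String) → Int → List (Int × String)
  | [], _ => []
  | p :: ps, n =>
    match labHelper p with
    | some l => (n, l) :: tFrom ps (n + 1)
    | none => tFrom ps (n + 1)

-- one per-category tagged index list of B
def mSeg (lab : String) (key : String × String) (ps : List (String × String)) (n : Int) : List (Int × String) :=
  (((PySem.List.enumerate ps n).filter (fun ip => ip.2 == key)).map (fun ip => ip.1)).map (fun i => (i, lab))

lemma mSeg_cons (lab : String) (key p : String × String) (ps : List (String × String)) (n : Int) :
    mSeg lab key (p :: ps) n = (if p == key then [((n : Int), lab)] else []) ++ mSeg lab key ps (n + 1) := by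
  by_cases h : p == key <;> simp [mSeg, PySem.List.enumerate_cons, List.filter_cons, h]

-- B's concatenation of the four category lists is a permutation of the chronological list
lemma perm_tagged (ps : List (String × String)) (n : Int) :
    (tFrom ps n).Perm
      (mSeg "TP" ("WT", "WT") ps n ++ mSeg "TN" ("ADGRL", "ADGRL") ps n ++
        mSeg "FP" ("ADGRL", "WT") ps n ++ mSeg "FN" ("WT", "ADGRL") ps n) := by
  induction ps generalizing n with
  | nil => simp [tFrom, mSeg]
  | cons p ps ih =>
    obtain ⟨act, pred⟩ := p
    rw [mSeg_cons, mSeg_cons, mSeg_cons, mSeg_cons]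
    by_cases h1 : pred = "WT" ∧ act = "WT"
    · obtain ⟨hp, ha⟩ := h1; subst hp; subst ha
      rw [show tFrom (("WT", "WT") :: ps) n = (n, "TP") :: tFrom ps (n + 1) from rfl]
      simpa [List.append_assoc] using (ih (n + 1)).cons ((n : Int), "TP")
    · by_cases h2 : pred = "ADGRL" ∧ act = "ADGRL"
      · obtain ⟨hp, ha⟩ := h2; subst hp; subst ha
        rw [show tFrom (("ADGRL", "ADGRL") :: ps) n = (n, "TN") :: tFrom ps (n + 1) from rfl]
        refine ((ih (n + 1)).cons ((n : Int), "TN")).trans ?_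
        simpa [List.append_assoc] using
          (List.perm_middle (a := ((n : Int), "TN")) (l₁ := mSeg "TP" ("WT", "WT") ps (n + 1))
            (l₂ := mSeg "TN" ("ADGRL", "ADGRL") ps (n + 1) ++ mSeg "FP" ("ADGRL", "WT") ps (n + 1) ++
              mSeg "FN" ("WT", "ADGRL") ps (n + 1))).symm
      · by_cases h3 : pred = "WT" ∧ act = "ADGRL"
        · obtain ⟨hp, ha⟩ := h3; subst hp; subst ha
          rw [show tFrom (("ADGRL", "WT") :: ps) n = (n, "FP") :: tFrom ps (n + 1) from rfl]
          refine ((ih (n + 1)).cons ((n : Int), "FP")).trans ?_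
          simpa [List.append_assoc] using
            (List.perm_middle (a := ((n : Int), "FP"))
              (l₁ := mSeg "TP" ("WT", "WT") ps (n + 1) ++ mSeg "TN" ("ADGRL", "ADGRL") ps (n + 1))
              (l₂ := mSeg "FP" ("ADGRL", "WT") ps (n + 1) ++ mSeg "FN" ("WT", "ADGRL") ps (n + 1))).symm
        · by_cases h4 : pred = "ADGRL" ∧ act = "WT"
          · obtain ⟨hp, ha⟩ := h4; subst hp; subst ha
            rw [show tFrom (("WT", "ADGRL") :: ps) n = (n, "FN") :: tFrom ps (n + 1) from rfl]
            refine ((ih (n + 1)).cons ((n : Int), "FN")).trans ?_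
            simpa [List.append_assoc] using
              (List.perm_middle (a := ((n : Int), "FN"))
                (l₁ := mSeg "TP" ("WT", "WT") ps (n + 1) ++ mSeg "TN" ("ADGRL", "ADGRL") ps (n + 1) ++
                  mSeg "FP" ("ADGRL", "WT") ps (n + 1))
                (l₂ := mSeg "FN" ("WT", "ADGRL") ps (n + 1))).symm
          · have hn : labHelper (act, pred) = none := by
              simp only [labHelper]
              rw [if_neg (by simpa using h1), if_neg (by simpa using h2),
                  if_neg (by simpa using h3), if_neg (by simpa using h4)]
            have e1 : (((act, pred) : String × String) == ("WT", "WT")) = false := by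
              simp only [beq_eq_false_iff_ne, ne_eq, Prod.mk.injEq, not_and]
              intro ha hp; exact h1 ⟨hp, ha⟩
            have e2 : (((act, pred) : String × String) == ("ADGRL", "ADGRL")) = false := by
              simp only [beq_eq_false_iff_ne, ne_eq, Prod.mk.injEq, not_and]
              intro ha hp; exact h2 ⟨hp, ha⟩
            have e3 : (((act, pred) : String × String) == ("ADGRL", "WT")) = false := by
              simp only [beq_eq_false_iff_ne, ne_eq, Prod.mk.injEq, not_and]
              intro ha hp; exact h3 ⟨hp, ha⟩
            have e4 : (((act, pred) : String × String) == ("WT", "ADGRL")) = false := by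
              simp only [beq_eq_false_iff_ne, ne_eq, Prod.mk.injEq, not_and]
              intro ha hp; exact h4 ⟨hp, ha⟩
            rw [show tFrom ((act, pred) :: ps) n = tFrom ps (n + 1) by simp [tFrom, hn]]
            simpa [e1, e2, e3, e4] using ih (n + 1)

lemma map_snd_tFrom (ps : List (String × String)) (n : Int) :
    (tFrom ps n).map (fun t => t.2) = ps.filterMap labHelper := by
  induction ps generalizing n with
  | nil => rfl
  | cons p ps ih =>
    simp only [tFrom, List.filterMap_cons]
    cases h : labHelper p <;> simp [ih]

lemma lb_tFrom (ps : List (String × String)) (n : Int) : ∀ x ∈ tFrom ps n, n ≤ x.1 := by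
  induction ps generalizing n with
  | nil => simp [tFrom]
  | cons p ps ih =>
    intro x hx
    simp only [tFrom] at hx
    cases h : labHelper p with
    | some l =>
      rw [h] at hx
      rcases List.mem_cons.mp hx with rfl | hx
      · simp
      · have := ih (n + 1) x hx; omega
    | none =>
      rw [h] at hx
      have := ih (n + 1) x hx; omega

lemma pairwise_tFrom (ps : List (String × String)) (n : Int) :
    (tFrom ps n).Pairwise (fun a b => a.1 < b.1) := by
  induction ps generalizing n with
  | nil => simp [tFrom]
  | cons p ps ih =>
    simp only [tFrom]
    cases h : labHelper p with
    | some l =>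
      refine List.pairwise_cons.mpr ⟨?_, ih (n + 1)⟩
      intro x hx
      have := lb_tFrom ps (n + 1) x hx
      show (n : Int) < x.1
      omega
    | none => exact ih (n + 1)

-- the number of hits of one category = the number of pairs equal to its key
lemma len_hits (key : String × String) (ps : List (String × String)) (n : Int) :
    (((PySem.List.enumerate ps n).filter (fun ip => ip.2 == key)).map (fun ip => ip.1)).length
      = ps.countP (fun p => p == key) := by
  induction ps generalizing n with
  | nil => rfl
  | cons p ps ih =>
    rw [PySem.List.enumerate_cons, List.countP_cons]
    by_cases h : p == key <;> simp [List.filter_cons, h, ih]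

-- a label's multiplicity in the label list = the number of pairs equal to its key
lemma count_filterMap (lab : String) (key : String × String)
    (h : ∀ p, labHelper p = some lab ↔ p = key) (ps : List (String × String)) :
    ((ps.filterMap labHelper).count lab : Nat) = ps.countP (fun p => p == key) := by
  induction ps with
  | nil => rfl
  | cons p ps ih =>
    rw [List.filterMap_cons, List.countP_cons]
    cases hl : labHelper p with
    | none =>
      have : (p == key) = false := by
        rw [beq_eq_false_iff_ne]
        intro e; rw [(h p).mpr e] at hl; cases hl
      simp [this, ih]
    | some l =>
      by_cases he : l = lab
      · subst he
        have : (p == key) = true := by rw [beq_iff_eq]; exact (h p).mp hl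
        simp [this, ih, List.count_cons]
      · have : (p == key) = false := by
          rw [beq_eq_false_iff_ne]
          intro e
          rw [(h p).mpr e] at hl
          exact he (Option.some.inj hl).symm
        simp [this, ih, List.count_cons, he]

lemma labTP : ∀ p, labHelper p = some "TP" ↔ p = ("WT", "WT") := by
  rintro ⟨a, b⟩; simp [labHelper]; split_ifs <;> simp_all [and_comm]
lemma labTN : ∀ p, labHelper p = some "TN" ↔ p = ("ADGRL", "ADGRL") := by
  rintro ⟨a, b⟩; simp [labHelper]; split_ifs <;> simp_all [and_comm]
lemma labFP : ∀ p, labHelper p = some "FP" ↔ p = ("ADGRL", "WT") := by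
  rintro ⟨a, b⟩; simp [labHelper]; split_ifs <;> simp_all [and_comm]
lemma labFN : ∀ p, labHelper p = some "FN" ↔ p = ("WT", "ADGRL") := by
  rintro ⟨a, b⟩; simp [labHelper]; split_ifs <;> simp_all [and_comm]

-- B, characterized by the same pair as A's loop
lemma result_alt_eq (actual prediction : List String) :
    result_alt actual prediction =
      ((actual.zip prediction).filterMap labHelper,
       [(((actual.zip prediction).filterMap labHelper).count "TP" : Int),
        (((actual.zip prediction).filterMap labHelper).count "TN" : Int),
        (((actual.zip prediction).filterMap labHelper).count "FP" : Int),
        (((actual.zip prediction).filterMap labHelper).count "FN" : Int)]) := by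
  unfold result_alt pvTable
  simp only [List.foldl_cons, List.foldl_nil, List.nil_append]
  have hsort :
      PySem.List.sorted
        (mSeg "TP" ("WT", "WT") (actual.zip prediction) 0 ++
          mSeg "TN" ("ADGRL", "ADGRL") (actual.zip prediction) 0 ++
          mSeg "FP" ("ADGRL", "WT") (actual.zip prediction) 0 ++
          mSeg "FN" ("WT", "ADGRL") (actual.zip prediction) 0) (fun t => t.1) =
        tFrom (actual.zip prediction) 0 :=
    PySem.List.sorted_eq_of_perm_of_pairwise_lt _ _ _
      (perm_tagged (actual.zip prediction) 0) (pairwise_tFrom (actual.zip prediction) 0)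
  simp only [show (∀ lab key, (((PySem.List.enumerate (actual.zip prediction)).filter
        (fun ip => ip.2 == key)).map (fun ip => ip.1)).map (fun i => (i, lab)) = mSeg lab key (actual.zip prediction) 0) from fun _ _ => rfl]
  rw [hsort, map_snd_tFrom]
  rw [(len_hits ("WT", "WT") (actual.zip prediction) 0).trans (count_filterMap "TP" _ labTP _).symm,
      (len_hits ("ADGRL", "ADGRL") (actual.zip prediction) 0).trans (count_filterMap "TN" _ labTN _).symm,
      (len_hits ("ADGRL", "WT") (actual.zip prediction) 0).trans (count_filterMap "FP" _ labFP _).symm,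
      (len_hits ("WT", "ADGRL") (actual.zip prediction) 0).trans (count_filterMap "FN" _ labFN _).symm]
  simp

-- ===== VERDICT (by name: the statement is the Claim_ definition above) =====
theorem result_spec : Claim_equal_result := by
  intro actual prediction _
  unfold Spec_result
  rw [result_alt_eq]
  unfold result
  rw [loop_eq]
  simp
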